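-- pv_equiv track=rewrite | github.com/BoarQing/CS380P | project3/graph_step1_hash.py | get_all_range
-- ===== SOURCE A (Python) =====
-- def get_all_range(num):
--     ret = []
--     cur = 1
--     while cur < num:
--         ret.append(cur)
--         cur *= 2
--     ret.append(num)
--     return ret
-- ===== SOURCE B (Python) =====
-- def get_all_range(num):
--     if num < 2:
--         return [num]
--     count = (num - 1).bit_length()
--     return [1 << i for i in range(count)] + [num]
-- ===== Notes on version B (the rewrite author's own statement) =====
-- stated objective: alternative
-- what changed: Replaces the doubling while-loop with a closed form: the count of powers of two below num is (num-1).bit_length(), and the result is built as shifted powers over range(count) plus [num].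
import Mathlib
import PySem

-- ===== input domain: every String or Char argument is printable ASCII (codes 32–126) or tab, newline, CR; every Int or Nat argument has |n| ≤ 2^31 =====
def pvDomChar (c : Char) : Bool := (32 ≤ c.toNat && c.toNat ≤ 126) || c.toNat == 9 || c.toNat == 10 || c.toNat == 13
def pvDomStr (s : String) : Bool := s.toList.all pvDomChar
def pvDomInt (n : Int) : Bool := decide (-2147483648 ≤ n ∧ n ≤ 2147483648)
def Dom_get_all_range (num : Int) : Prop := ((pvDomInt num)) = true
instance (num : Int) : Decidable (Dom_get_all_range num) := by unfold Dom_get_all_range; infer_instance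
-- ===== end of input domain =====

-- B replaces A's doubling while-loop with a closed form: count = bit_length(num-1) powers of two, then num (objective: alternative).


-- ===== PORT A =====
-- A's while-loop; the '0 < cur' conjunct is a totality guard only (cur starts at 1 and doubles, so it always holds on reachable states).
def getAllRangeLoop (num : Int) (ret : List Int) (cur : Int) : List Int :=
  if h : 0 < cur ∧ cur < num then
    getAllRangeLoop num (ret ++ [cur]) (2 * cur)
  else ret ++ [num]
termination_by (num - cur).toNat
decreasing_by omega

def get_all_range (num : Int) : List Int :=
  getAllRangeLoop num [] 1

-- ===== PORT B =====
-- Source B: if num < 2: return [num]; count = (num-1).bit_length(); return [1 << i for i in range(count)] + [num]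
-- Python's n.bit_length() for n ≥ 1 is Nat.log2 n + 1; 1 << i is 2^i.
def get_all_range_alt (num : Int) : List Int :=
  if num < 2 then [num]
  else
    let count := Nat.log2 (num - 1).toNat + 1
    ((List.range count).map (fun i => (2 : Int) ^ i)) ++ [num]

-- ===== PRECONDITION & SPEC =====
def Spec_get_all_range (num : Int) (out : List Int) : Prop := out = get_all_range_alt num
instance (num : Int) (out : List Int) : Decidable (Spec_get_all_range num out) := by unfold Spec_get_all_range; infer_instance

-- ===== CLAIM (what is proved, stated in full; the proofs are below) =====
def Claim_equal_get_all_range : Prop := ∀ (num : Int), Dom_get_all_range num → Spec_get_all_range num (get_all_range num)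

-- ===== LEMMAS AND PROOFS =====

-- After m more iterations starting at cur = 2^k (with k + m = count), the loop emits powers 2^k … 2^(k+m-1), then num.
theorem getAllRangeLoop_eq (num : Int) (h2 : 2 ≤ num) :
    ∀ (m k : Nat) (ret : List Int),
      k + m = Nat.log2 (num - 1).toNat + 1 →
      getAllRangeLoop num ret ((2 : Int) ^ k)
        = ret ++ ((List.range' k m).map (fun i => (2 : Int) ^ i)) ++ [num] := by
  have hn1 : ((num - 1).toNat : Int) = num - 1 := Int.toNat_of_nonneg (by omega)
  intro m
  induction m with
  | zero =>
    intro k ret hk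
    have hub : (num - 1).toNat < 2 ^ ((num - 1).toNat.log2 + 1) := Nat.lt_log2_self
    have hubi : num - 1 < (2 : Int) ^ k := by
      rw [← hn1]
      calc ((num - 1).toNat : Int) < ((2 ^ ((num - 1).toNat.log2 + 1) : Nat) : Int) := by
            exact_mod_cast hub
        _ = (2 : Int) ^ k := by rw [← hk]; push_cast; ring
    rw [getAllRangeLoop]
    simp only [List.range'_zero, List.map_nil, List.append_nil]
    rw [dif_neg (by omega)]
  | succ m ih =>
    intro k ret hk
    have hne : (num - 1).toNat ≠ 0 := by omega
    have hlow : 2 ^ (num - 1).toNat.log2 ≤ (num - 1).toNat := Nat.log2_self_le hne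
    have hki : (2 : Int) ^ k < num := by
      have hk' : k ≤ (num - 1).toNat.log2 := by omega
      have h1 : (2 : Nat) ^ k ≤ 2 ^ (num - 1).toNat.log2 := Nat.pow_le_pow_right (by norm_num) hk'
      have : ((2 ^ k : Nat) : Int) ≤ num - 1 := by rw [← hn1]; exact_mod_cast le_trans h1 hlow
      have h2' : ((2 ^ k : Nat) : Int) = (2 : Int) ^ k := by push_cast; ring
      omega
    have hpos : (0 : Int) < 2 ^ k := by positivity
    rw [getAllRangeLoop, dif_pos ⟨hpos, hki⟩]
    have hdouble : 2 * (2 : Int) ^ k = 2 ^ (k + 1) := by ring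
    rw [hdouble, ih (k + 1) (ret ++ [(2 : Int) ^ k]) (by omega)]
    simp [List.range'_succ]

theorem get_all_range_eq_alt (num : Int) : get_all_range num = get_all_range_alt num := by
  by_cases h : num < 2
  · rw [get_all_range, getAllRangeLoop, dif_neg (by omega), get_all_range_alt, if_pos h]
    simp
  · have h2 : 2 ≤ num := by omega
    have := getAllRangeLoop_eq num h2 (Nat.log2 (num - 1).toNat + 1) 0 [] (by omega)
    rw [get_all_range]
    simp only [pow_zero] at this
    rw [this, get_all_range_alt, if_neg h]
    simp [List.range_eq_range']

-- ===== VERDICT (by name: the statement is the Claim_ definition above) =====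
theorem get_all_range_spec : Claim_equal_get_all_range := by
  intro num _
  unfold Spec_get_all_range
  exact get_all_range_eq_alt num
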